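-- pv_equiv track=rewrite | github.com/GPTI314/OSINT | lead_discovery/lead_discovery.py | _classify_form
-- ===== SOURCE A (Python) =====
-- from typing import Dict, List, Optional, Any
--
-- def _classify_form(form: Dict[str, Any]) -> Optional[str]:
--     """Classify form type based on fields."""
--     fields = [f.get('name', '').lower() for f in form.get('fields', [])]
--
--     if any(f in fields for f in ['email', 'name', 'message']):
--         return 'contact_forms'
--     if any(f in fields for f in ['quote', 'budget', 'project']):
--         return 'quote_forms'
--     if any(f in fields for f in ['application', 'loan', 'amount']):
--         return 'application_forms'
--     if 'email' in fields and len(fields) <= 2: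
--         return 'newsletter_forms'
--
--     return 'lead_capture_forms'
-- ===== SOURCE B (Python) =====
-- _PRIORITY = {
--     'email': 1, 'name': 1, 'message': 1,
--     'quote': 2, 'budget': 2, 'project': 2,
--     'application': 3, 'loan': 3, 'amount': 3,
-- }
--
-- _LABELS = ('contact_forms', 'quote_forms', 'application_forms', 'lead_capture_forms')
--
--
-- def _classify_form(form):
--     """Classify form type based on fields (single pass, min-priority accumulator)."""
--     best = 4
--     for f in form.get('fields', []):
--         best = min(best, _PRIORITY.get(f.get('name', '').lower(), 4))
--     return _LABELS[best - 1]
-- ===== Notes on version B (the rewrite author's own statement) =====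
-- stated objective: alternative
-- what changed: Instead of A's staged keyword-group branches (each scanning the field list), B makes one pass over the fields, mapping each lowercased field name to a numeric priority via a keyword->priority dict and keeping the minimum, then indexes a label table; the first matching rule equals the minimum priority, and A's newsletter branch is dead code (an 'email' field already matched the contact group).
import Mathlib
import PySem

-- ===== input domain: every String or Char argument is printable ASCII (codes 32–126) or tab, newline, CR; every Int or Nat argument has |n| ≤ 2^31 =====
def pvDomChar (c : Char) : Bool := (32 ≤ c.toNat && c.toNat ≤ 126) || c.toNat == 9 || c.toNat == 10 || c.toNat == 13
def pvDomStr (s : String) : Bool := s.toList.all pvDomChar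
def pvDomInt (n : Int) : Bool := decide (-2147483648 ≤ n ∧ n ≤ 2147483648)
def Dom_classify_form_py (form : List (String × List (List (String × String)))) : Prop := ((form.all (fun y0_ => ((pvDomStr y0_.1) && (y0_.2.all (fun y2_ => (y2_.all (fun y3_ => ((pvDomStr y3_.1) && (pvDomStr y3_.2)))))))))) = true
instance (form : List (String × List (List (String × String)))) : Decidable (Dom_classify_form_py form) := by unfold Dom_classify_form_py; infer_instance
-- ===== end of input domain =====

-- B replaces A's staged keyword-group branch scans with one pass over the fields
-- keeping the minimum priority of any matched keyword (objective: alternative);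
-- A's newsletter branch is dead code and is dropped.

-- ===== PORT A =====
-- fields = [f.get('name','').lower() for f in form.get('fields', [])]
def pvFieldsA (form : List (String × List (List (String × String)))) : List String :=
  ((PySem.Dict.mk form).getD "fields" []).map
    (fun f => PySem.Str.lower ((PySem.Dict.mk f).getD "name" ""))

def classify_form_py (form : List (String × List (List (String × String)))) : Option String :=
  let fields := pvFieldsA form
  if (["email", "name", "message"].any (fun f => fields.contains f)) then some "contact_forms"
  else if (["quote", "budget", "project"].any (fun f => fields.contains f)) then some "quote_forms"
  else if (["application", "loan", "amount"].any (fun f => fields.contains f)) then some "application_forms"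
  else if fields.contains "email" && fields.length ≤ 2 then some "newsletter_forms"
  else some "lead_capture_forms"

-- ===== PORT B =====
-- _PRIORITY = {...}
def pvPriority : PySem.Dict String Int :=
  PySem.Dict.mk [("email", 1), ("name", 1), ("message", 1),
                 ("quote", 2), ("budget", 2), ("project", 2),
                 ("application", 3), ("loan", 3), ("amount", 3)]

-- _LABELS = (...)
def pvLabels : List String :=
  ["contact_forms", "quote_forms", "application_forms", "lead_capture_forms"]

-- _PRIORITY.get(f.get('name','').lower(), 4)
def pvPrio (f : List (String × String)) : Int :=
  pvPriority.getD (PySem.Str.lower ((PySem.Dict.mk f).getD "name" "")) 4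

def classify_form_py_alt (form : List (String × List (List (String × String)))) : Option String :=
  -- best = 4; for f in form.get('fields', []): best = min(best, _PRIORITY.get(..., 4))
  let best : Int :=
    ((PySem.Dict.mk form).getD "fields" []).foldl (fun b f => min b (pvPrio f)) 4
  -- return _LABELS[best - 1]   (best is always in 1..4, so the index is in range)
  PySem.List.pyGet? pvLabels (best - 1)

-- ===== PRECONDITION & SPEC =====
def Spec_classify_form_py (form : List (String × List (List (String × String)))) (out : Option String) : Prop := out = classify_form_py_alt form
instance (form : List (String × List (List (String × String)))) (out : Option String) : Decidable (Spec_classify_form_py form out) := by unfold Spec_classify_form_py; infer_instance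

-- ===== CLAIM =====
def Claim_equal_classify_form_py : Prop := ∀ (form : List (String × List (List (String × String)))), Dom_classify_form_py form → Spec_classify_form_py form (classify_form_py form)

-- ===== LEMMAS AND PROOFS =====

theorem pvPriority_getD (s : String) :
    pvPriority.getD s 4 =
      (if s = "email" ∨ s = "name" ∨ s = "message" then 1
       else if s = "quote" ∨ s = "budget" ∨ s = "project" then 2
       else if s = "application" ∨ s = "loan" ∨ s = "amount" then 3
       else 4) := by
  simp only [pvPriority, PySem.Dict.getD, PySem.Dict.get?_mk_cons, beq_iff_eq]
  split_ifs <;> simp_all [PySem.Dict.get?] <;> tauto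

theorem pvPrio_cases (f : List (String × String)) :
    pvPrio f =
      (let s := PySem.Str.lower ((PySem.Dict.mk f).getD "name" "");
       if s = "email" ∨ s = "name" ∨ s = "message" then 1
       else if s = "quote" ∨ s = "budget" ∨ s = "project" then 2
       else if s = "application" ∨ s = "loan" ∨ s = "amount" then 3
       else 4) := pvPriority_getD _

theorem pvPrio_ge1 (f : List (String × String)) : 1 ≤ pvPrio f := by
  rw [pvPrio_cases]; dsimp only; split_ifs <;> norm_num

theorem pv_fold_le (L : List (List (String × String))) (acc n : Int) :
    L.foldl (fun b f => min b (pvPrio f)) acc ≤ n ↔ acc ≤ n ∨ ∃ f ∈ L, pvPrio f ≤ n := by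
  induction L generalizing acc with
  | nil => simp
  | cons h t ih =>
      simp only [List.foldl_cons, ih, min_le_iff, List.mem_cons]
      constructor
      · rintro (⟨h1 | h1⟩ | ⟨f, hf, hle⟩)
        · exact Or.inl h1
        · exact Or.inr ⟨h, Or.inl rfl, h1⟩
        · exact Or.inr ⟨f, Or.inr hf, hle⟩
      · rintro (h1 | ⟨f, (rfl | hf), hle⟩)
        · exact Or.inl (Or.inl h1)
        · exact Or.inl (Or.inr hle)
        · exact Or.inr ⟨f, hf, hle⟩

theorem pv_fold_ge1 (L : List (List (String × String))) (acc : Int) (h : 1 ≤ acc) :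
    1 ≤ L.foldl (fun b f => min b (pvPrio f)) acc := by
  induction L generalizing acc with
  | nil => simpa
  | cons hd t ih => exact ih _ (le_min h (pvPrio_ge1 hd))

-- ===== VERDICT =====
theorem classify_form_py_spec : Claim_equal_classify_form_py := by
  intro form _
  unfold Spec_classify_form_py classify_form_py classify_form_py_alt pvFieldsA
  set F := (PySem.Dict.mk form).getD "fields" [] with hF
  set nm : List (String × String) → String :=
    fun f => PySem.Str.lower ((PySem.Dict.mk f).getD "name" "") with hnm
  set best := F.foldl (fun b f => min b (pvPrio f)) 4 with hbest
  have hge : 1 ≤ best := pv_fold_ge1 F 4 (by norm_num)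
  have hle4 : best ≤ 4 := by rw [hbest, pv_fold_le]; left; norm_num
  have hprio : ∀ f, pvPrio f =
      (if nm f = "email" ∨ nm f = "name" ∨ nm f = "message" then 1
       else if nm f = "quote" ∨ nm f = "budget" ∨ nm f = "project" then 2
       else if nm f = "application" ∨ nm f = "loan" ∨ nm f = "amount" then 3
       else 4) := fun f => pvPrio_cases f
  by_cases c1 : ∃ f ∈ F, nm f = "email" ∨ nm f = "name" ∨ nm f = "message"
  · have hb1 : best ≤ 1 := by
      rw [hbest, pv_fold_le]; right
      obtain ⟨f, hf, hc⟩ := c1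
      exact ⟨f, hf, by rw [hprio f, if_pos hc]⟩
    have : best = 1 := le_antisymm hb1 hge
    rw [this]
    have g1 : (["email", "name", "message"].any (fun k => (F.map nm).contains k)) = true := by
      obtain ⟨f, hf, hc⟩ := c1
      simp only [List.any_eq_true, List.contains_iff_mem, List.mem_map]
      rcases hc with h | h | h
      · exact ⟨"email", by simp, f, hf, h⟩
      · exact ⟨"name", by simp, f, hf, h⟩
      · exact ⟨"message", by simp, f, hf, h⟩
    rw [if_pos g1]; rfl
  · have g1 : ¬ (["email", "name", "message"].any (fun k => (F.map nm).contains k)) = true := by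
      simp only [List.any_eq_true, List.contains_iff_mem, List.mem_map]
      rintro ⟨k, hk, f, hf, rfl⟩
      exact c1 ⟨f, hf, by simpa using hk⟩
    rw [if_neg g1]
    by_cases c2 : ∃ f ∈ F, nm f = "quote" ∨ nm f = "budget" ∨ nm f = "project"
    · have hb2 : best ≤ 2 := by
        rw [hbest, pv_fold_le]; right
        obtain ⟨f, hf, hc⟩ := c2
        refine ⟨f, hf, ?_⟩
        rw [hprio f, if_neg (fun h => c1 ⟨f, hf, h⟩), if_pos hc]
      have hb1 : ¬ best ≤ 1 := by
        rw [hbest, pv_fold_le]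
        rintro (h | ⟨f, hf, hle⟩)
        · norm_num at h
        · rw [hprio f] at hle
          split_ifs at hle with h1 h2 h3
          · exact c1 ⟨f, hf, h1⟩
          all_goals norm_num at hle
      have : best = 2 := by omega
      rw [this]
      have g2 : (["quote", "budget", "project"].any (fun k => (F.map nm).contains k)) = true := by
        obtain ⟨f, hf, hc⟩ := c2
        simp only [List.any_eq_true, List.contains_iff_mem, List.mem_map]
        rcases hc with h | h | h
        · exact ⟨"quote", by simp, f, hf, h⟩
        · exact ⟨"budget", by simp, f, hf, h⟩
        · exact ⟨"project", by simp, f, hf, h⟩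
      rw [if_pos g2]; rfl
    · have g2 : ¬ (["quote", "budget", "project"].any (fun k => (F.map nm).contains k)) = true := by
        simp only [List.any_eq_true, List.contains_iff_mem, List.mem_map]
        rintro ⟨k, hk, f, hf, rfl⟩
        exact c2 ⟨f, hf, by simpa using hk⟩
      rw [if_neg g2]
      by_cases c3 : ∃ f ∈ F, nm f = "application" ∨ nm f = "loan" ∨ nm f = "amount"
      · have hb3 : best ≤ 3 := by
          rw [hbest, pv_fold_le]; right
          obtain ⟨f, hf, hc⟩ := c3
          refine ⟨f, hf, ?_⟩
          rw [hprio f, if_neg (fun h => c1 ⟨f, hf, h⟩), if_neg (fun h => c2 ⟨f, hf, h⟩), if_pos hc]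
        have hb2 : ¬ best ≤ 2 := by
          rw [hbest, pv_fold_le]
          rintro (h | ⟨f, hf, hle⟩)
          · norm_num at h
          · rw [hprio f] at hle
            split_ifs at hle with h1 h2 h3
            · exact c1 ⟨f, hf, h1⟩
            · exact c2 ⟨f, hf, h2⟩
            all_goals norm_num at hle
        have : best = 3 := by omega
        rw [this]
        have g3 : (["application", "loan", "amount"].any (fun k => (F.map nm).contains k)) = true := by
          obtain ⟨f, hf, hc⟩ := c3
          simp only [List.any_eq_true, List.contains_iff_mem, List.mem_map]
          rcases hc with h | h | h
          · exact ⟨"application", by simp, f, hf, h⟩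
          · exact ⟨"loan", by simp, f, hf, h⟩
          · exact ⟨"amount", by simp, f, hf, h⟩
        rw [if_pos g3]; rfl
      · have g3 : ¬ (["application", "loan", "amount"].any (fun k => (F.map nm).contains k)) = true := by
          simp only [List.any_eq_true, List.contains_iff_mem, List.mem_map]
          rintro ⟨k, hk, f, hf, rfl⟩
          exact c3 ⟨f, hf, by simpa using hk⟩
        rw [if_neg g3]
        have hb3 : ¬ best ≤ 3 := by
          rw [hbest, pv_fold_le]
          rintro (h | ⟨f, hf, hle⟩)
          · norm_num at h
          · rw [hprio f] at hle
            split_ifs at hle with h1 h2 h3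
            · exact c1 ⟨f, hf, h1⟩
            · exact c2 ⟨f, hf, h2⟩
            · exact c3 ⟨f, hf, h3⟩
            · norm_num at hle
        have : best = 4 := by omega
        rw [this]
        -- the newsletter test cannot fire: 'email' in fields contradicts g1
        have g4 : ¬ ((F.map nm).contains "email" && decide ((F.map nm).length ≤ 2)) = true := by
          simp only [Bool.and_eq_true, List.contains_iff_mem, List.mem_map]
          rintro ⟨⟨f, hf, hnmf⟩, -⟩
          exact c1 ⟨f, hf, Or.inl hnmf⟩
        rw [if_neg g4]; rfl
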